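-- pv_equiv track=rewrite | github.com/WorryingWonton/PyBats | string_3.py | sameEnds
-- ===== SOURCE A (Python) =====
-- def sameEnds(my_string):
--     lh = my_string[0:int(len(my_string) / 2)]
--     rh = my_string[int(len(my_string) / 2) + len(my_string) % 2:len(my_string)]
--     new_s = ''
--     while rh:
--         if lh[0] != rh[0]:
--             new_s = ''
--         else:
--             new_s += rh[0]
--             lh = lh[1:]
--         rh = rh[1:]
--     return new_s if new_s and new_s[0] == my_string[0] else ''
-- ===== SOURCE B (Python) =====
-- def sameEnds(my_string):
--     n = len(my_string)
--     h = n // 2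
--     off = h + n % 2
--     j = 0          # pointer into the left half (advances only on a match)
--     start = 0      # start (within the right half) of the current matching run
--     for i in range(h):
--         if my_string[j] == my_string[off + i]:
--             j += 1
--         else:
--             start = i + 1
--     if start < h and my_string[off + start] == my_string[0]:
--         return my_string[off + start:]
--     return ''
-- ===== Notes on version B (the rewrite author's own statement) =====
-- stated objective: faster
-- what changed: Replaces the while-loop over ever-reshrinking string slices (lh=lh[1:], rh=rh[1:]) and character-by-character string concatenation with a single indexed pass keeping two integer pointers (left-half index j, run-start marker) and producing the result as one final slice.
import Mathlib
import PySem

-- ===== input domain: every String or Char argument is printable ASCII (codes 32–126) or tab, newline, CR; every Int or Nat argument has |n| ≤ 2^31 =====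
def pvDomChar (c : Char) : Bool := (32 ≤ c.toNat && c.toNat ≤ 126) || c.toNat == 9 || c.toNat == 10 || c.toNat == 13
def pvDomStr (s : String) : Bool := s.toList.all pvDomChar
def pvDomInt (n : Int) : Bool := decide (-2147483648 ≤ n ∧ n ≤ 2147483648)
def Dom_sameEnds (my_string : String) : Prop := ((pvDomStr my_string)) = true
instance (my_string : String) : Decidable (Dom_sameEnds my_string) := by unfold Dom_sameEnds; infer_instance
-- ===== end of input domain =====

-- B replaces A's while-loop over reshrinking string slices and char-by-char concatenation by a
-- single indexed pass with two integer pointers and one final slice (measured faster; O(n) vs O(n^2)).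

-- ===== PORT A =====
-- the while loop: state (lh, rh, new_s); the lh = [] branch with rh nonempty is unreachable
-- from sameEnds's initial state (there Python would raise IndexError on lh[0])
def pvLoopA : List Char → List Char → List Char → List Char
  | _, [], acc => acc
  | [], _ :: _, acc => acc
  | l :: lt, r :: rt, acc =>
    if l ≠ r then pvLoopA (l :: lt) rt []
    else pvLoopA lt rt (acc ++ [r])

-- strings are handled as List Char (PySem.Chars side); int(len/2) is exact floor division here
def sameEnds (my_string : String) : String :=
  let cs := my_string.toList
  let n : Int := cs.length
  let lh := PySem.List.slice cs (some 0) (some (PySem.Int.floordiv n 2))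
  let rh := PySem.List.slice cs (some (PySem.Int.floordiv n 2 + PySem.Int.mod n 2)) (some n)
  let new_s := pvLoopA lh rh []
  -- 'new_s if new_s and new_s[0] == my_string[0] else ""' (and short-circuits, so
  -- my_string[0] is only read when new_s is nonempty, which forces cs nonempty)
  match new_s, cs with
  | c :: _, c0 :: _ => if c = c0 then String.mk new_s else ""
  | _, _ => ""

-- ===== PORT B =====
-- one step of Source B's for-loop: state (j, start)
def pvStepB (cs : List Char) (off : Nat) (p : Nat × Nat) (i : Nat) : Nat × Nat :=
  if cs.getD p.1 ' ' = cs.getD (off + i) ' ' then (p.1 + 1, p.2) else (p.1, i + 1)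

def sameEnds_alt (my_string : String) : String :=
  let cs := my_string.toList
  let n := cs.length
  let h := n / 2
  let off := h + n % 2
  let p := (List.range h).foldl (pvStepB cs off) (0, 0)
  if p.2 < h ∧ cs.getD (off + p.2) ' ' = cs.getD 0 ' ' then String.mk (cs.drop (off + p.2))
  else ""

-- ===== PRECONDITION & SPEC =====
def Spec_sameEnds (my_string : String) (out : String) : Prop := out = sameEnds_alt my_string
instance (my_string : String) (out : String) : Decidable (Spec_sameEnds my_string out) := by unfold Spec_sameEnds; infer_instance

-- ===== CLAIM (what is proved, stated in full; the proofs are below) =====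
def Claim_equal_sameEnds : Prop := ∀ (my_string : String), Dom_sameEnds my_string → Spec_sameEnds my_string (sameEnds my_string)

-- ===== LEMMAS AND PROOFS =====

-- index (within rh) just past the last mismatch of A's scan; 0 if no mismatch occurs
def pvRel : List Char → List Char → Nat
  | _, [] => 0
  | lh, r :: rt =>
    if lh.head? = some r then
      (if pvRel lh.tail rt = 0 then 0 else pvRel lh.tail rt + 1)
    else 1 + pvRel lh rt

-- number of matches of A's scan (= final j of B's loop)
def pvM : List Char → List Char → Nat
  | _, [] => 0
  | lh, r :: rt => if lh.head? = some r then 1 + pvM lh.tail rt else pvM lh rt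

lemma pvRel_le : ∀ (rh lh : List Char), pvRel lh rh ≤ rh.length := by
  intro rh
  induction rh with
  | nil => intro lh; simp [pvRel]
  | cons r rt ih =>
    intro lh
    simp only [pvRel, List.length_cons]
    split_ifs with h1 h2
    · omega
    · have := ih lh.tail; omega
    · have := ih lh; omega

lemma pvRel_take : ∀ (rh lh : List Char) (k : Nat), rh.length ≤ k →
    pvRel (lh.take k) rh = pvRel lh rh := by
  intro rh
  induction rh with
  | nil => intro lh k _; simp [pvRel]
  | cons r rt ih =>
    intro lh k hk
    cases lh with
    | nil => simp
    | cons l lt =>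
      cases k with
      | zero => simp at hk
      | succ k' =>
        simp only [List.take_succ_cons, pvRel, List.head?_cons, List.tail_cons]
        rw [ih lt k' (by simp only [List.length_cons] at hk; omega), ← List.take_succ_cons,
          ih (l :: lt) (k' + 1) (by simp only [List.length_cons] at hk; omega)]

lemma pvLoopA_eq : ∀ (rh lh acc : List Char), rh.length ≤ lh.length →
    pvLoopA lh rh acc = (if pvRel lh rh = 0 then acc else []) ++ rh.drop (pvRel lh rh) := by
  intro rh
  induction rh with
  | nil => intro lh acc _; simp [pvLoopA, pvRel]
  | cons r rt ih =>
    intro lh acc hlen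
    cases lh with
    | nil => simp at hlen
    | cons l lt =>
      by_cases hlr : l = r
      · subst hlr
        have e1 : pvLoopA (l :: lt) (l :: rt) acc = pvLoopA lt rt (acc ++ [l]) := by
          simp [pvLoopA]
        have e2 : pvRel (l :: lt) (l :: rt) = if pvRel lt rt = 0 then 0 else pvRel lt rt + 1 := by
          simp [pvRel]
        rw [e1, e2, ih lt (acc ++ [l]) (by simp only [List.length_cons] at hlen; omega)]
        by_cases h0 : pvRel lt rt = 0
        · simp [h0]
        · rw [if_neg h0, if_neg h0, if_neg (show ¬ (pvRel lt rt + 1 = 0) by omega)]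
          simp [List.drop_succ_cons]
      · have e1 : pvLoopA (l :: lt) (r :: rt) acc = pvLoopA (l :: lt) rt [] := by
          simp [pvLoopA, hlr]
        have e2 : pvRel (l :: lt) (r :: rt) = 1 + pvRel (l :: lt) rt := by
          simp [pvRel, hlr]
        rw [e1, e2, ih (l :: lt) [] (by simp only [List.length_cons] at hlen ⊢; omega)]
        rw [if_neg (show ¬ (1 + pvRel (l :: lt) rt = 0) by omega), List.nil_append]
        have hd : (r :: rt).drop (1 + pvRel (l :: lt) rt) = rt.drop (pvRel (l :: lt) rt) := by
          rw [Nat.add_comm]; simp [List.drop_succ_cons]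
        rw [hd]
        by_cases h0 : pvRel (l :: lt) rt = 0 <;> simp [h0]

lemma pvFold : ∀ (m : Nat) (cs : List Char) (off i0 j0 s0 : Nat),
    j0 ≤ off + i0 → off + i0 + m ≤ cs.length →
    (List.range' i0 m).foldl (pvStepB cs off) (j0, s0) =
      (j0 + pvM (cs.drop j0) ((cs.drop (off + i0)).take m),
       if pvRel (cs.drop j0) ((cs.drop (off + i0)).take m) = 0 then s0
       else i0 + pvRel (cs.drop j0) ((cs.drop (off + i0)).take m)) := by
  intro m
  induction m with
  | zero => intro cs off i0 j0 s0 _ _; simp [pvM, pvRel]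
  | succ m ih =>
    intro cs off i0 j0 s0 hj hm
    have hi : off + i0 < cs.length := by omega
    have hj' : j0 < cs.length := by omega
    have hR : cs.drop (off + i0) = cs[off + i0] :: cs.drop (off + i0 + 1) :=
      List.drop_eq_getElem_cons hi
    have hL : cs.drop j0 = cs[j0] :: cs.drop (j0 + 1) :=
      List.drop_eq_getElem_cons hj'
    have hgj : cs.getD j0 ' ' = cs[j0] := List.getD_eq_getElem cs ' ' hj'
    have hgi : cs.getD (off + i0) ' ' = cs[off + i0] := List.getD_eq_getElem cs ' ' hi
    rw [List.range'_succ, List.foldl_cons]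
    have hstep : pvStepB cs off (j0, s0) i0 =
        if cs[j0] = cs[off + i0] then (j0 + 1, s0) else (j0, i0 + 1) := by
      simp only [pvStepB]
      rw [hgj, hgi]
    rw [hstep, hR, hL]
    simp only [List.take_succ_cons, pvM, pvRel, List.head?_cons, List.tail_cons,
      Option.some.injEq]
    by_cases heq : cs[j0] = cs[off + i0]
    · simp only [if_pos heq]
      rw [ih cs off (i0 + 1) (j0 + 1) s0 (by omega) (by omega)]
      simp only [← Nat.add_assoc]
      simp only [Prod.mk.injEq]
      refine ⟨by simp, ?_⟩
      by_cases h0 : pvRel (cs.drop (j0 + 1)) ((cs.drop (off + i0 + 1)).take m) = 0 <;>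
        simp [h0] <;> omega
    · simp only [if_neg heq]
      rw [← hL]
      rw [ih cs off (i0 + 1) j0 (i0 + 1) (by omega) (by omega)]
      simp only [← Nat.add_assoc]
      simp only [Prod.mk.injEq, true_and]
      rw [if_neg (show ¬ (1 + pvRel (cs.drop j0) ((cs.drop (off + i0 + 1)).take m) = 0) by omega)]
      by_cases h0 : pvRel (cs.drop j0) ((cs.drop (off + i0 + 1)).take m) = 0 <;>
        simp [h0]

-- ===== VERDICT (by name: the statement is the Claim_ definition above) =====
theorem sameEnds_spec : Claim_equal_sameEnds := by
  intro s _
  unfold Spec_sameEnds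
  simp only [sameEnds, sameEnds_alt]
  set cs := s.toList with hcs
  set n := cs.length with hn
  set h := n / 2 with hh
  set off := h + n % 2 with hoff
  have hoffn : off + h = n := by omega
  -- reduce A's slices
  have hfd : PySem.Int.floordiv (n : Int) 2 = ((h : Nat) : Int) := by
    rw [show ((2 : Int)) = ((2 : Nat) : Int) from rfl]
    exact PySem.Int.floordiv_natCast n 2
  have hmd : PySem.Int.mod (n : Int) 2 = ((n % 2 : Nat) : Int) := by
    rw [show ((2 : Int)) = ((2 : Nat) : Int) from rfl]
    exact PySem.Int.mod_natCast n 2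
  have hslice1 : PySem.List.slice cs (some 0) (some (PySem.Int.floordiv (n : Int) 2)) = cs.take h := by
    rw [hfd, show ((0 : Int)) = ((0 : Nat) : Int) from rfl, PySem.List.slice_natCast]
    simp
  have hslice2 : PySem.List.slice cs
      (some (PySem.Int.floordiv (n : Int) 2 + PySem.Int.mod (n : Int) 2)) (some (n : Int)) =
      cs.drop off := by
    rw [hfd, hmd, show ((h : Nat) : Int) + ((n % 2 : Nat) : Int) = ((off : Nat) : Int) by push_cast [hoff]; ring,
      PySem.List.slice_natCast]
    exact List.take_of_length_le (by simp; omega)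
  rw [hslice1, hslice2]
  -- both sides via pvRel
  have hlenR : (cs.drop off).length = h := by simp; omega
  have hlenL : (cs.take h).length = h := by simp; omega
  set rel := pvRel (cs.take h) (cs.drop off) with hrel
  have hA : pvLoopA (cs.take h) (cs.drop off) [] = (cs.drop off).drop rel := by
    rw [pvLoopA_eq (cs.drop off) (cs.take h) [] (by omega), ite_self, List.nil_append, hrel]
  have hB : (List.range h).foldl (pvStepB cs off) (0, 0) =
      (pvM cs (cs.drop off), rel) := by
    rw [List.range_eq_range', pvFold h cs off 0 0 0 (by omega) (by omega)]
    simp only [List.drop_zero, Nat.add_zero, Nat.zero_add,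
      List.take_of_length_le (le_of_eq hlenR)]
    rw [hrel, ← pvRel_take (cs.drop off) cs h (le_of_eq hlenR)]
    by_cases h0 : pvRel (cs.take h) (cs.drop off) = 0 <;> simp [h0]
  rw [hA, hB]
  have hrelle : rel ≤ h := by
    have := pvRel_le (cs.drop off) (cs.take h); omega
  have hdd : (cs.drop off).drop rel = cs.drop (off + rel) := by
    rw [List.drop_drop]
  by_cases hlt : rel < h
  · have hidx : off + rel < cs.length := by omega
    have hne2 : cs.drop (off + rel) ≠ [] := by
      intro hnil
      have := congrArg List.length hnil
      simp only [List.length_drop, List.length_nil] at this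
      omega
    obtain ⟨c1, t1, h1⟩ := List.exists_cons_of_ne_nil hne2
    have hne : cs ≠ [] := by
      intro hnil; rw [hnil] at hidx; simp at hidx
    obtain ⟨c0, ct, hct⟩ := List.exists_cons_of_ne_nil hne
    have hg0 : cs.getD 0 ' ' = c0 := by rw [hct]; rfl
    have hgr : cs.getD (off + rel) ' ' = c1 := by
      have h2 : (cs.drop (off + rel)).getD 0 ' ' = c1 := by rw [h1]; rfl
      rw [← h2]
      simp [List.getD, List.getElem?_drop]
    rw [hdd, h1, hgr, hg0, hct]
    simp only [hlt, true_and]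
  · have hre : rel = h := by omega
    have hnilR : (cs.drop off).drop rel = [] := by
      apply List.eq_nil_of_length_eq_zero
      rw [List.length_drop, List.length_drop]
      omega
    rw [hnilR]
    have hcond : ¬ (rel < h ∧ cs.getD (off + rel) ' ' = cs.getD 0 ' ') := by
      rintro ⟨hc, -⟩; omega
    rw [if_neg hcond]
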